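-- pv_equiv track=rewrite | github.com/yusacetin/xfwaita | generate_borders.py | generate_bottom_right
-- ===== SOURCE A (Python) =====
-- DARK = 0
--
-- ACTIVE = 0
--
-- DARK_ACTIVE_BORDER = (22, 22, 22, 255) # dark_slim and dark_large have slightly different title bar borders, this matches the slim variant. might fix in the future
--
-- DARK_INACTIVE_BORDER = DARK_ACTIVE_BORDER
--
-- DARK_ACTIVE_PADDING = (53, 53, 53, 255) # should actually be 50 but for some reason 53 turns out to be 50
--
-- DARK_INACTIVE_PADDING = DARK_ACTIVE_PADDING
--
-- DARK_BORDER_WIDTH = 5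
--
-- LIGHT_ACTIVE_BORDER = (0, 0, 0, 255)
--
-- LIGHT_INACTIVE_BORDER = LIGHT_ACTIVE_BORDER
--
-- LIGHT_ACTIVE_PADDING = (246, 245, 244, 255)
--
-- LIGHT_INACTIVE_PADDING = LIGHT_ACTIVE_PADDING
--
-- LIGHT_BORDER_WIDTH = 5
--
-- CORNER_SPAN = 16
--
-- def generate_bottom_right(variant, mode):
--     width = DARK_BORDER_WIDTH if (variant == DARK) else LIGHT_BORDER_WIDTH
--
--     if (variant == DARK):
--         if (mode == ACTIVE):
--             border = DARK_ACTIVE_BORDER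
--             padding = DARK_ACTIVE_PADDING
--         else: # inactive
--             border = DARK_INACTIVE_BORDER
--             padding = DARK_INACTIVE_PADDING
--     else: # light
--         if (mode == ACTIVE):
--             border = LIGHT_ACTIVE_BORDER
--             padding = LIGHT_ACTIVE_PADDING
--         else: # inactive
--             border = LIGHT_INACTIVE_BORDER
--             padding = LIGHT_INACTIVE_PADDING
--
--     pixels = [[(0,0,0,0) for col in range(CORNER_SPAN)] for row in range(CORNER_SPAN)]
--     for row in range(CORNER_SPAN):
--         for col in range(CORNER_SPAN):
--             if (col == CORNER_SPAN-1):
--                 pixels[row][col] = border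
--             elif (row == (CORNER_SPAN-1)):
--                 pixels[row][col] = border
--             elif (col > (CORNER_SPAN-DARK_BORDER_WIDTH-1)):
--                 pixels[row][col] = padding
--             elif (row > (CORNER_SPAN-DARK_BORDER_WIDTH-1)):
--                 pixels[row][col] = padding
--             else:
--                 pass # leave at transparent
--     return pixels
-- ===== SOURCE B (Python) =====
-- DARK = 0
--
-- ACTIVE = 0
--
-- DARK_ACTIVE_BORDER = (22, 22, 22, 255)
--
-- DARK_INACTIVE_BORDER = DARK_ACTIVE_BORDER
--
-- DARK_ACTIVE_PADDING = (53, 53, 53, 255)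
--
-- DARK_INACTIVE_PADDING = DARK_ACTIVE_PADDING
--
-- DARK_BORDER_WIDTH = 5
--
-- LIGHT_ACTIVE_BORDER = (0, 0, 0, 255)
--
-- LIGHT_INACTIVE_BORDER = LIGHT_ACTIVE_BORDER
--
-- LIGHT_ACTIVE_PADDING = (246, 245, 244, 255)
--
-- LIGHT_INACTIVE_PADDING = LIGHT_ACTIVE_PADDING
--
-- LIGHT_BORDER_WIDTH = 5
--
-- CORNER_SPAN = 16
--
-- def generate_bottom_right(variant, mode):
--     # same color-selection branch as the original
--     if variant == DARK:
--         if mode == ACTIVE: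
--             border, padding = DARK_ACTIVE_BORDER, DARK_ACTIVE_PADDING
--         else:
--             border, padding = DARK_INACTIVE_BORDER, DARK_INACTIVE_PADDING
--     else:
--         if mode == ACTIVE:
--             border, padding = LIGHT_ACTIVE_BORDER, LIGHT_ACTIVE_PADDING
--         else:
--             border, padding = LIGHT_INACTIVE_BORDER, LIGHT_INACTIVE_PADDING
--
--     # assemble the three distinct row shapes, top to bottom
--     transparent = (0, 0, 0, 0)
--     n = CORNER_SPAN
--     w = DARK_BORDER_WIDTH - 1  # the 4-pixel padding band before the border line
--     top_row = [transparent] * (n - w - 1) + [padding] * w + [border]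
--     band_row = [padding] * (n - 1) + [border]
--     bottom_row = [border] * n
--     return [list(top_row) for _ in range(n - w - 1)] \
--          + [list(band_row) for _ in range(w)] \
--          + [bottom_row]
-- ===== Notes on version B (the rewrite author's own statement) =====
-- stated objective: simpler
-- what changed: Replaces the per-cell if/elif priority scan over the 16x16 double loop with direct assembly of the three distinct row shapes (transparent/padding band/border) replicated and concatenated.
import Mathlib
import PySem

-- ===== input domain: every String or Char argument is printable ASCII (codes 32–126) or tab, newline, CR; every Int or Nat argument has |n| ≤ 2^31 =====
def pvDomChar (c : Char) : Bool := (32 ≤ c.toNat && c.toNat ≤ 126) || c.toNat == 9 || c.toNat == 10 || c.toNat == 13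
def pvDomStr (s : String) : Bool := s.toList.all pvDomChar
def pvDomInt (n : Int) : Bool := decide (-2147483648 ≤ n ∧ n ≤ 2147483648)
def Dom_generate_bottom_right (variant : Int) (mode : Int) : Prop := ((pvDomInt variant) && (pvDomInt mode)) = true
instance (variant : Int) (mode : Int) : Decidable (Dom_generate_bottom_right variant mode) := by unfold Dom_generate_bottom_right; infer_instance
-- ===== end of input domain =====

-- B builds the grid as three replicated row shapes concatenated (simpler decomposition)
-- instead of A's per-cell if/elif priority scan over a 16×16 double loop; return values are equal.

-- ===== PORT A =====
-- module constants
def DARK : Int := 0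
def ACTIVE : Int := 0
def DARK_ACTIVE_BORDER : Int × Int × Int × Int := (22, 22, 22, 255)
def DARK_INACTIVE_BORDER : Int × Int × Int × Int := DARK_ACTIVE_BORDER
def DARK_ACTIVE_PADDING : Int × Int × Int × Int := (53, 53, 53, 255)
def DARK_INACTIVE_PADDING : Int × Int × Int × Int := DARK_ACTIVE_PADDING
def DARK_BORDER_WIDTH : Int := 5
def LIGHT_ACTIVE_BORDER : Int × Int × Int × Int := (0, 0, 0, 255)
def LIGHT_INACTIVE_BORDER : Int × Int × Int × Int := LIGHT_ACTIVE_BORDER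
def LIGHT_ACTIVE_PADDING : Int × Int × Int × Int := (246, 245, 244, 255)
def LIGHT_INACTIVE_PADDING : Int × Int × Int × Int := LIGHT_ACTIVE_PADDING
def LIGHT_BORDER_WIDTH : Int := 5
def CORNER_SPAN : Int := 16

def generate_bottom_right (variant : Int) (mode : Int) : List (List (Int × Int × Int × Int)) :=
  let _width := if variant = DARK then DARK_BORDER_WIDTH else LIGHT_BORDER_WIDTH
  let bp : (Int × Int × Int × Int) × (Int × Int × Int × Int) :=
    if variant = DARK then
      if mode = ACTIVE then (DARK_ACTIVE_BORDER, DARK_ACTIVE_PADDING)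
      else (DARK_INACTIVE_BORDER, DARK_INACTIVE_PADDING)
    else
      if mode = ACTIVE then (LIGHT_ACTIVE_BORDER, LIGHT_ACTIVE_PADDING)
      else (LIGHT_INACTIVE_BORDER, LIGHT_INACTIVE_PADDING)
  let border := bp.1
  let padding := bp.2
  let pixels := (PySem.List.pyRange 0 CORNER_SPAN 1).map
    (fun _ => (PySem.List.pyRange 0 CORNER_SPAN 1).map (fun _ => ((0,0,0,0) : Int × Int × Int × Int)))
  (PySem.List.pyRange 0 CORNER_SPAN 1).foldl (fun pixels row =>
    (PySem.List.pyRange 0 CORNER_SPAN 1).foldl (fun pixels col =>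
      if col = CORNER_SPAN - 1 then
        PySem.List.pySetD pixels row (PySem.List.pySetD (PySem.List.pyGetD pixels row []) col border)
      else if row = CORNER_SPAN - 1 then
        PySem.List.pySetD pixels row (PySem.List.pySetD (PySem.List.pyGetD pixels row []) col border)
      else if col > CORNER_SPAN - DARK_BORDER_WIDTH - 1 then
        PySem.List.pySetD pixels row (PySem.List.pySetD (PySem.List.pyGetD pixels row []) col padding)
      else if row > CORNER_SPAN - DARK_BORDER_WIDTH - 1 then
        PySem.List.pySetD pixels row (PySem.List.pySetD (PySem.List.pyGetD pixels row []) col padding)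
      else pixels) pixels) pixels

-- ===== PORT B =====
def generate_bottom_right_alt (variant : Int) (mode : Int) : List (List (Int × Int × Int × Int)) :=
  let bp : (Int × Int × Int × Int) × (Int × Int × Int × Int) :=
    if variant = DARK then
      if mode = ACTIVE then (DARK_ACTIVE_BORDER, DARK_ACTIVE_PADDING)
      else (DARK_INACTIVE_BORDER, DARK_INACTIVE_PADDING)
    else
      if mode = ACTIVE then (LIGHT_ACTIVE_BORDER, LIGHT_ACTIVE_PADDING)
      else (LIGHT_INACTIVE_BORDER, LIGHT_INACTIVE_PADDING)
  let border := bp.1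
  let padding := bp.2
  let transparent : Int × Int × Int × Int := (0, 0, 0, 0)
  let n := CORNER_SPAN.toNat
  let w := (DARK_BORDER_WIDTH - 1).toNat
  let top_row := List.replicate (n - w - 1) transparent ++ List.replicate w padding ++ [border]
  let band_row := List.replicate (n - 1) padding ++ [border]
  let bottom_row := List.replicate n border
  List.replicate (n - w - 1) top_row ++ List.replicate w band_row ++ [bottom_row]

-- ===== PRECONDITION & SPEC =====
def Spec_generate_bottom_right (variant : Int) (mode : Int) (out : List (List (Int × Int × Int × Int))) : Prop := out = generate_bottom_right_alt variant mode
instance (variant : Int) (mode : Int) (out : List (List (Int × Int × Int × Int))) : Decidable (Spec_generate_bottom_right variant mode out) := by unfold Spec_generate_bottom_right; infer_instance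

-- ===== CLAIM (what is proved, stated in full; the proofs are below) =====
def Claim_equal_generate_bottom_right : Prop := ∀ (variant : Int) (mode : Int), Dom_generate_bottom_right variant mode → Spec_generate_bottom_right variant mode (generate_bottom_right variant mode)

-- ===== LEMMAS AND PROOFS =====
-- Both grids depend on the inputs only through the (border, padding) pair chosen by
-- identical branches; for each concrete pair the two constant grids are equal by 'decide'.
set_option maxRecDepth 100000 in
theorem pv_grid_eq (variant mode : Int) :
    generate_bottom_right variant mode = generate_bottom_right_alt variant mode := by
  unfold generate_bottom_right generate_bottom_right_alt
  by_cases hv : variant = DARK <;> by_cases hm : mode = ACTIVE <;>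
    simp only [hv, hm, if_false, if_pos] <;> decide

-- ===== VERDICT (by name: the statement is the Claim_ definition above) =====
theorem generate_bottom_right_spec : Claim_equal_generate_bottom_right := by
  intro variant mode _
  exact pv_grid_eq variant mode
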